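-- pv_equiv track=rewrite | github.com/YuiHyuuga/Tabelas-INMET | main.py | ano
-- ===== SOURCE A (Python) =====
-- def ano(diretorio):
--     barra = 0
--     con = 0
--     ano = ""
--     anos = "  "
--     for a in diretorio:
--         if a =="/":
--             barra+=1
--         con+=1
--         if barra>=5:
--             ano = diretorio[con:]
--             break
--     for z in ano:
--         if z =="/":
--             break
--         else:
--             anos+=z
--     return anos
-- ===== SOURCE B (Python) =====
-- def ano(diretorio):
--     partes = diretorio.split('/')
--     if len(partes) > 5:
--         return "  " + partes[5]
--     return "  "
-- ===== Notes on version B (the rewrite author's own statement) =====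
-- stated objective: simpler
-- what changed: Replaces A's two manual character-scanning loops (count slashes, then accumulate until the next slash) with one split on the slash separator building the full segment list and a direct index of segment 5.
import Mathlib
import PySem

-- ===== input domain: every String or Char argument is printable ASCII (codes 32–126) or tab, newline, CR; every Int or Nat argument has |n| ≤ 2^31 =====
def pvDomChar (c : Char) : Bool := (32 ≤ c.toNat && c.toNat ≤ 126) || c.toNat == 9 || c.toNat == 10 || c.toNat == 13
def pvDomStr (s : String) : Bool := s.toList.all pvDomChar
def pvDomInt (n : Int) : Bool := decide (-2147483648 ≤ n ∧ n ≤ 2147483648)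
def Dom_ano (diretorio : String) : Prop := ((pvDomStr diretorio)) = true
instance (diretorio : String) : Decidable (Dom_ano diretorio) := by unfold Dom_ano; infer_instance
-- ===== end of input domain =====

-- B replaces A's two manual scanning loops with a single split('/') plus a direct index ("simpler").

-- ===== PORT A =====
-- first loop: count slashes; after the character that makes barra ≥ 5, ano = diretorio[con:] and break
def anoLoop1 (d : List Char) : List Char → Int → Int → List Char
  | [], _, _ => []
  | a :: rest, barra, con =>
    let barra' := if a = '/' then barra + 1 else barra
    let con' := con + 1
    if barra' ≥ 5 then PySem.List.slice d (some con') none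
    else anoLoop1 d rest barra' con'

-- second loop: append chars of ano to anos until a '/'
def anoLoop2 : List Char → List Char → List Char
  | acc, [] => acc
  | acc, z :: rest => if z = '/' then acc else anoLoop2 (acc ++ [z]) rest

def ano (diretorio : String) : String :=
  String.mk (anoLoop2 [' ', ' '] (anoLoop1 diretorio.toList diretorio.toList 0 0))

-- ===== PORT B =====
-- hand port of str.split('/'): list of '/'-separated segments
def splitSlash : List Char → List (List Char)
  | [] => [[]]
  | a :: rest =>
    if a = '/' then [] :: splitSlash rest
    else
      match splitSlash rest with
      | [] => [[a]]          -- unreachable: splitSlash is never empty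
      | h :: t => (a :: h) :: t

def ano_alt (diretorio : String) : String :=
  let partes := splitSlash diretorio.toList
  if h : 5 < partes.length then String.mk ([' ', ' '] ++ partes[5]) else String.mk [' ', ' ']

-- ===== PRECONDITION & SPEC =====
def Spec_ano (diretorio : String) (out : String) : Prop := out = ano_alt diretorio
instance (diretorio : String) (out : String) : Decidable (Spec_ano diretorio out) := by unfold Spec_ano; infer_instance

-- ===== CLAIM (what is proved, stated in full; the proofs are below) =====
def Claim_equal_ano : Prop := ∀ (diretorio : String), Dom_ano diretorio → Spec_ano diretorio (ano diretorio)

-- ===== LEMMAS AND PROOFS =====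

-- suffix after the k-th slash (k ≥ 1), [] if fewer than k slashes
def skipA : Nat → List Char → List Char
  | _, [] => []
  | k, a :: rest => if a = '/' then (if k ≤ 1 then rest else skipA (k - 1) rest) else skipA k rest

theorem anoLoop2_eq (cs acc : List Char) :
    anoLoop2 acc cs = acc ++ cs.takeWhile (· ≠ '/') := by
  induction cs generalizing acc with
  | nil => simp [anoLoop2]
  | cons z rest ih =>
    by_cases hz : z = '/' <;> simp [anoLoop2, List.takeWhile, hz, ih]

theorem anoLoop1_eq (d : List Char) (cs : List Char) (barra con : Int)
    (hcon : 0 ≤ con) (hdrop : d.drop con.toNat = cs) (hb : barra ≤ 4) :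
    anoLoop1 d cs barra con = skipA (5 - barra).toNat cs := by
  induction cs generalizing barra con with
  | nil => simp [anoLoop1, skipA]
  | cons a rest ih =>
    have hdrop' : d.drop (con + 1).toNat = rest := by
      have h1 : (con + 1).toNat = con.toNat + 1 := by omega
      rw [h1, ← List.drop_drop, hdrop]; rfl
    have hslice : PySem.List.slice d (some (con + 1)) none = rest := by
      rw [PySem.List.slice_from d (show (0:Int) ≤ con + 1 by omega), hdrop']
    by_cases ha : a = '/'
    · by_cases h5 : barra + 1 ≥ 5
      · have hb4 : barra = 4 := by omega
        simp [anoLoop1, skipA, ha, hb4, hslice]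
      · have hk : ¬ ((5 - barra).toNat ≤ 1) := by omega
        have hk' : (5 - (barra + 1)).toNat = (5 - barra).toNat - 1 := by omega
        rw [show anoLoop1 d (a :: rest) barra con = anoLoop1 d rest (barra + 1) (con + 1) by
              simp [anoLoop1, ha, h5],
            show skipA (5 - barra).toNat (a :: rest) = skipA ((5 - barra).toNat - 1) rest by
              simp [skipA, ha, hk],
            ih (barra + 1) (con + 1) (by omega) hdrop' (by omega), hk']
    · have h5 : ¬ (barra ≥ 5) := by omega
      rw [show anoLoop1 d (a :: rest) barra con = anoLoop1 d rest barra (con + 1) by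
            simp [anoLoop1, ha, h5],
          show skipA (5 - barra).toNat (a :: rest) = skipA (5 - barra).toNat rest by
            simp [skipA, ha]]
      exact ih barra (con + 1) (by omega) hdrop' hb

theorem splitSlash_ne_nil (cs : List Char) : splitSlash cs ≠ [] := by
  cases cs with
  | nil => simp [splitSlash]
  | cons a rest =>
    by_cases ha : a = '/'
    · simp [splitSlash, ha]
    · simp only [splitSlash, if_neg ha]
      cases splitSlash rest <;> simp

theorem splitSlash_head (cs : List Char) :
    (splitSlash cs).getD 0 [] = cs.takeWhile (· ≠ '/') := by
  induction cs with
  | nil => simp [splitSlash]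
  | cons a rest ih =>
    by_cases ha : a = '/'
    · simp [splitSlash, ha, List.takeWhile]
    · simp only [splitSlash, if_neg ha]
      have hne := splitSlash_ne_nil rest
      cases h : splitSlash rest with
      | nil => exact absurd h hne
      | cons hh tt =>
        rw [h] at ih
        simp only [List.getD, List.getElem?_cons_zero, Option.getD_some] at ih
        simp only [ne_eq, decide_not] at ih
        simp [List.takeWhile, ha, List.getD, ih]

theorem skipA_eq_splitSlash (cs : List Char) (k : Nat) (hk : 1 ≤ k) :
    (skipA k cs).takeWhile (· ≠ '/') = (splitSlash cs).getD k [] := by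
  induction cs generalizing k with
  | nil =>
    cases k with
    | zero => omega
    | succ n => simp [skipA, splitSlash, List.getD]
  | cons a rest ih =>
    by_cases ha : a = '/'
    · by_cases h1 : k ≤ 1
      · have hk1 : k = 1 := by omega
        subst hk1
        have hd := splitSlash_head rest
        simp only [ne_eq, decide_not] at hd
        simp only [List.getD] at hd
        simp [skipA, splitSlash, ha, List.getD]
        exact hd.symm
      · have hk' : 1 ≤ k - 1 := by omega
        have hgd : (([] : List Char) :: splitSlash rest).getD k [] = (splitSlash rest).getD (k - 1) [] := by
          cases k with
          | zero => omega
          | succ n => simp [List.getD]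
        subst ha
        rw [show skipA k ('/' :: rest) = skipA (k - 1) rest by simp [skipA, h1],
            show splitSlash ('/' :: rest) = [] :: splitSlash rest by simp [splitSlash],
            hgd]
        exact ih (k - 1) hk'
    · have hne := splitSlash_ne_nil rest
      cases h : splitSlash rest with
      | nil => exact absurd h hne
      | cons hh tt =>
        have hgd : ((a :: hh) :: tt).getD k [] = (hh :: tt).getD k [] := by
          cases k with
          | zero => omega
          | succ n => simp [List.getD]
        rw [show skipA k (a :: rest) = skipA k rest by simp [skipA, ha],
            show splitSlash (a :: rest) = (a :: hh) :: tt by simp [splitSlash, ha, h],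
            hgd, ← h, ← ih k hk]

-- ===== VERDICT (by name: the statement is the Claim_ definition above) =====
theorem ano_spec : Claim_equal_ano := by
  intro d _
  unfold Spec_ano ano ano_alt
  have h1 : anoLoop1 d.toList d.toList 0 0 = skipA 5 d.toList :=
    anoLoop1_eq d.toList d.toList 0 0 (le_refl 0) (by simp) (by omega)
  have h2 := anoLoop2_eq (anoLoop1 d.toList d.toList 0 0) [' ', ' ']
  have h3 := skipA_eq_splitSlash d.toList 5 (by omega)
  rw [h2, h1, h3]
  by_cases h : 5 < (splitSlash d.toList).length
  · simp only [dif_pos h]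
    congr 1
    simp [List.getD, List.getElem?_eq_getElem h]
  · simp only [dif_neg h]
    have : (splitSlash d.toList).getD 5 [] = [] := by
      simp [List.getD, List.getElem?_eq_none (by omega : (splitSlash d.toList).length ≤ 5)]
    rw [this]
    simp
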